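-- pv_equiv track=rewrite | github.com/tjhrad/advent-of-code | 2025/day_07/solution.py | simulate_timelines
-- ===== SOURCE A (Python) =====
-- def simulate_timelines(start, splitters):
--     (sx, sy) = start
--     q = [(sx, sy, 1)]
--     count = 0
--     max_y = max([y for _, y in splitters]) + 1
--
--     while q:
--         row_blocks = {}
--
--         for current in q:
--             (x, y, t) = current
--
--             if y >= max_y:
--                 count += t
--                 continue
--
--             if (x, y + 1) in splitters:
--                 for n in [(x + 1, y), (x - 1, y)]:
--                     if n in splitters:
--                         continue
--
--                     if n in row_blocks:
--                         row_blocks[n] += t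
--                     else:
--                         row_blocks[n] = t
--             elif y < max_y:
--                 if (x, y + 1) in row_blocks:
--                     row_blocks[(x, y + 1)] += t
--                 else:
--                     row_blocks[(x, y + 1)] = t
--
--         q.clear()
--         for (rx, ry), rt in row_blocks.items():
--             q.append((rx, ry, rt))
--
--     return count
-- ===== SOURCE B (Python) =====
-- def simulate_timelines(start, splitters):
--     (sx, sy) = start
--     max_y = max([y for _, y in splitters]) + 1
--
--     def f(x, y):
--         # slide straight down until the next splitter (or the bottom)
--         while y < max_y and (x, y + 1) not in splitters:
--             y += 1
--         if y >= max_y: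
--             return 1
--         # split: each free neighbour carries the timeline on; blocked ones add nothing
--         return sum(f(nx, y) for nx in (x + 1, x - 1) if (nx, y) not in splitters)
--
--     return f(sx, sy)
-- ===== Notes on version B (the rewrite author's own statement) =====
-- stated objective: simpler
-- what changed: Replaces A's iterative level-by-level wavefront (a queue plus a per-row dict of merged timeline counts) with a direct recursive descent: slide each timeline straight down to the next splitter (or the bottom) and recursively sum the contributions of the free neighbours.
-- outside the precondition, e.g. on simulate_timelines((0, 0), {(6, 1), (5, 1)}): A returns 1, B returns 1
import Mathlib
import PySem

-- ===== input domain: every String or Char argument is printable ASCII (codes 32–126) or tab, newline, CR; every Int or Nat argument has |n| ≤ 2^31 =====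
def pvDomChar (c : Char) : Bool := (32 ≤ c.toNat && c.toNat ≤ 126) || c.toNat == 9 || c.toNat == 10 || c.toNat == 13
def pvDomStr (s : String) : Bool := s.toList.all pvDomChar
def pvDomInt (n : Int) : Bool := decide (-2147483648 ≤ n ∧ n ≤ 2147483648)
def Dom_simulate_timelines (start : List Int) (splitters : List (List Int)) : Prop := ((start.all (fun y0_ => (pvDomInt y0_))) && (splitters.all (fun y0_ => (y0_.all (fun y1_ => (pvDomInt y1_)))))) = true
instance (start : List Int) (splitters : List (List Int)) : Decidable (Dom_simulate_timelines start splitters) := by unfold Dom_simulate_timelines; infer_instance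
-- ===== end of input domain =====

-- B replaces A's level-by-level queue/dict wavefront with a recursive descent that slides each
-- timeline straight down to the next splitter and sums the free neighbours' counts
-- (objective: simpler).  Both ports carry a fuel parameter as a totality guard only: on the
-- boards admitted by Pre_ the fuel provably never runs out (outside Pre_, e.g. with two
-- horizontally adjacent splitters, the Python programs need not terminate at all).

-- ===== PORT A =====

-- `(x, y) in splitters`: the tuple equals an element iff that element is the pair [x, y] (exact)
def memA (p : Int × Int) (xs : List (List Int)) : Bool :=
  xs.any (fun s => s == [p.1, p.2])

-- the body of A's `for current in q` loop: fold state = (count, row_blocks)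
def stepA (splitters : List (List Int)) (max_y : Int)
    (acc : Int × PySem.Dict (Int × Int) Int) (e : Int × Int × Int) :
    Int × PySem.Dict (Int × Int) Int :=
  match e, acc with
  | (x, y, t), (count, rb) =>
    if max_y ≤ y then (count + t, rb)           -- `if y >= max_y: count += t; continue`
    else if memA (x, y + 1) splitters then
      (count,
        [(x + 1, y), (x - 1, y)].foldl
          (fun rb n =>
            if memA n splitters then rb
            else if (rb.get? n).isSome then rb.insert n (rb.getD n 0 + t)
            else rb.insert n t)
          rb)
    else if y < max_y then
      (count,
        if (rb.get? (x, y + 1)).isSome then rb.insert (x, y + 1) (rb.getD (x, y + 1) 0 + t)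
        else rb.insert (x, y + 1) t)
    else (count, rb)

-- one pass of the while-loop body over the whole queue
def passA (splitters : List (List Int)) (max_y : Int)
    (q : List (Int × Int × Int)) (count : Int) : Int × PySem.Dict (Int × Int) Int :=
  q.foldl (stepA splitters max_y) (count, PySem.Dict.empty)

-- A's `while q:` loop; the fuel is a totality guard only (never exhausted under Pre_)
def loopA (splitters : List (List Int)) (max_y : Int) :
    Nat → List (Int × Int × Int) → Int → Int
  | 0, _, count => count
  | fuel + 1, q, count =>
    if q = [] then count
    else
      loopA splitters max_y fuel
        ((passA splitters max_y q count).2.items.map (fun it => (it.1.1, it.1.2, it.2)))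
        (passA splitters max_y q count).1

def simulate_timelines (start : List Int) (splitters : List (List Int)) : Int :=
  match start with
  | [sx, sy] =>
    -- max([y for _, y in splitters]) + 1: exact when splitters ≠ [] and every element has
    -- length 2 (otherwise Python raises; excluded by Pre_)
    let max_y := ((PySem.List.max? (splitters.map (fun s => s.getD 1 0)) (fun y => y)).getD 0) + 1
    loopA splitters max_y (2 * (max_y - sy).toNat + 3) [(sx, sy, 1)] 0
  | _ => 0  -- Python raises on unpacking; excluded by Pre_

-- ===== PORT B =====

-- `(x, y) in splitters` (exact, as for memA; `contains` = first-match scan)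
def memB (p : Int × Int) (xs : List (List Int)) : Bool :=
  xs.contains [p.1, p.2]

-- B's inner `while` loop: slide straight down to the next splitter or the bottom
def skipDownB (splitters : List (List Int)) (max_y x y : Int) : Int :=
  if h : y < max_y ∧ memB (x, y + 1) splitters = false then
    skipDownB splitters max_y x (y + 1)
  else y
termination_by (max_y - y).toNat
decreasing_by omega

-- B's recursive f; the two-element generator `for nx in (x+1, x-1)` is unrolled;
-- the fuel is a totality guard only (never exhausted under Pre_)
def fB (splitters : List (List Int)) (max_y : Int) : Nat → Int → Int → Int
  | 0, _, _ => 0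
  | fuel + 1, x, y =>
    let y' := skipDownB splitters max_y x y
    if max_y ≤ y' then 1
    else
      (if !memB (x + 1, y') splitters then fB splitters max_y fuel (x + 1) y' else 0)
        + (if !memB (x - 1, y') splitters then fB splitters max_y fuel (x - 1) y' else 0)

def simulate_timelines_alt (start : List Int) (splitters : List (List Int)) : Int :=
  -- `(sx, sy) = start`: exact when start has length 2 (otherwise Python raises; excluded by Pre_)
  if start.length = 2 then
    let sx := start.getD 0 0
    let sy := start.getD 1 0
    let max_y := ((PySem.List.max? (splitters.map (fun s => s.getD 1 0)) (fun y => y)).getD 0) + 1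
    fB splitters max_y (2 * (max_y - sy).toNat + 2) sx sy
  else 0

-- ===== PRECONDITION & SPEC =====

-- no two splitters sit side by side in the same row
def NoAdj (splitters : List (List Int)) : Prop :=
  ∀ a ∈ splitters, ∀ b ∈ splitters, a.getD 1 0 = b.getD 1 0 → (a.getD 0 0 - b.getD 0 0).natAbs ≠ 1

-- The first three clauses hold exactly where Python A does not raise: start must unpack as a
-- pair, splitters must be non-empty (max([]) raises ValueError) and each splitter must unpack
-- as a pair.  The NoAdj clause excludes boards with two horizontally adjacent splitters, on
-- which the splitting cascade can bounce between neighbouring columns forever so that A need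
-- not terminate; whether such a pair is actually reached is not a closed-form condition, so
-- all such boards are excluded (on the unreached ones A still returns, see the cites).
def Pre_simulate_timelines (start : List Int) (splitters : List (List Int)) : Prop :=
  start.length = 2 ∧ splitters ≠ [] ∧ (∀ s ∈ splitters, s.length = 2) ∧ NoAdj splitters
instance (start : List Int) (splitters : List (List Int)) : Decidable (Pre_simulate_timelines start splitters) := by unfold Pre_simulate_timelines NoAdj; infer_instance
def pvWitness_simulate_timelines : List Int × List (List Int) := ([0, 0], [[0, 2]])

def Spec_simulate_timelines (start : List Int) (splitters : List (List Int)) (out : Int) : Prop := out = simulate_timelines_alt start splitters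
instance (start : List Int) (splitters : List (List Int)) (out : Int) : Decidable (Spec_simulate_timelines start splitters out) := by unfold Spec_simulate_timelines; infer_instance

-- ===== CLAIM (what is proved, stated in full; the proofs are below) =====
def Claim_equal_simulate_timelines : Prop := ∀ (start : List Int) (splitters : List (List Int)), Dom_simulate_timelines start splitters → Pre_simulate_timelines start splitters → Spec_simulate_timelines start splitters (simulate_timelines start splitters)

-- ===== LEMMAS AND PROOFS =====

theorem memA_eq (p : Int × Int) (xs : List (List Int)) :
    memA p xs = decide ([p.1, p.2] ∈ xs) := by
  by_cases h : [p.1, p.2] ∈ xs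
  · simp only [memA, h, decide_true, List.any_eq_true]
    exact ⟨_, h, by simp⟩
  · simp only [memA, h, decide_false, List.any_eq_false]
    intro s hs
    simp only [beq_iff_eq]
    intro he
    exact h (he ▸ hs)

theorem memB_eq (p : Int × Int) (xs : List (List Int)) :
    memB p xs = decide ([p.1, p.2] ∈ xs) := by
  simp [memB]

-- the ranking that bounds how much fuel a timeline at (x, y) can consume
def rnk (S : List (List Int)) (m x y : Int) : Nat :=
  2 * (m - y).toNat + (if [x, y + 1] ∈ S then 2 else 1)

theorem rnk_pos (S : List (List Int)) (m x y : Int) : 1 ≤ rnk S m x y := by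
  unfold rnk; split <;> omega

theorem noAdj_not_mem {S : List (List Int)} (hna : NoAdj S) {x y nb : Int}
    (hm : [x, y] ∈ S) (hnb : (nb - x).natAbs = 1) : [nb, y] ∉ S := by
  intro hc
  exact hna _ hc _ hm rfl hnb

-- skipDownB facts
theorem skipDownB_le (S : List (List Int)) (m x y : Int) : y ≤ skipDownB S m x y := by
  fun_induction skipDownB with
  | case1 y h ih => omega
  | case2 y h => omega

theorem skipDownB_stop (S : List (List Int)) (m x y : Int) :
    ¬ (skipDownB S m x y < m ∧ memB (x, skipDownB S m x y + 1) S = false) := by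
  fun_induction skipDownB with
  | case1 y h ih => exact ih
  | case2 y h => exact h

theorem skipDownB_eq_self {S : List (List Int)} {m x y : Int}
    (h : ¬ (y < m ∧ memB (x, y + 1) S = false)) : skipDownB S m x y = y := by
  rw [skipDownB, dif_neg h]

theorem skipDownB_step {S : List (List Int)} {m x y : Int}
    (h1 : y < m) (h2 : memB (x, y + 1) S = false) :
    skipDownB S m x y = skipDownB S m x (y + 1) := by
  rw [skipDownB, dif_pos ⟨h1, h2⟩]

-- one-step unfolding of fB
theorem fB_succ (S : List (List Int)) (m : Int) (fuel : Nat) (x y : Int) :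
    fB S m (fuel + 1) x y
      = if m ≤ skipDownB S m x y then 1
        else
          (if !memB (x + 1, skipDownB S m x y) S then
              fB S m fuel (x + 1) (skipDownB S m x y) else 0)
            + (if !memB (x - 1, skipDownB S m x y) S then
                fB S m fuel (x - 1) (skipDownB S m x y) else 0) := rfl

theorem fB_down {S : List (List Int)} {m x y : Int} (k : Nat)
    (h1 : y < m) (h2 : memB (x, y + 1) S = false) :
    fB S m k x y = fB S m k x (y + 1) := by
  cases k with
  | zero => rfl
  | succ n => rw [fB_succ, fB_succ, skipDownB_step h1 h2]

-- fuel irrelevance: any fuel at least rnk computes the same value as fuel = rnk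
theorem fB_rank {S : List (List Int)} {m : Int} (hna : NoAdj S) :
    ∀ n x y, rnk S m x y ≤ n → fB S m n x y = fB S m (rnk S m x y) x y := by
  intro n
  induction n using Nat.strong_induction_on with
  | _ n ih =>
    intro x y hn
    have h1 := rnk_pos S m x y
    obtain ⟨n', rfl⟩ : ∃ n', n = n' + 1 := ⟨n - 1, by omega⟩
    obtain ⟨r', hr⟩ : ∃ r', rnk S m x y = r' + 1 := ⟨rnk S m x y - 1, by omega⟩
    rw [hr, fB_succ, fB_succ]
    by_cases hstop : m ≤ skipDownB S m x y
    · rw [if_pos hstop, if_pos hstop]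
    · rw [if_neg hstop, if_neg hstop]
      have hy' := skipDownB_le S m x y
      set y' := skipDownB S m x y with hy'def
      have hmem : memB (x, y' + 1) S = true := by
        have := skipDownB_stop S m x y
        rw [← hy'def] at this
        cases hb : memB (x, y' + 1) S
        · exact absurd ⟨by omega, hb⟩ this
        · rfl
      have hmem' : [x, y' + 1] ∈ S := by
        rw [memB_eq] at hmem; exact of_decide_eq_true hmem
      have hry' : rnk S m x y' ≤ rnk S m x y := by
        rcases eq_or_lt_of_le hy' with h | h
        · rw [← h]
        · unfold rnk
          rw [if_pos hmem']
          split <;> omega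
      have key : ∀ nb : Int, (nb - x).natAbs = 1 → memB (nb, y') S = false →
          fB S m n' nb y' = fB S m r' nb y' := by
        intro nb hd _
        have hnb : [nb, y' + 1] ∉ S := noAdj_not_mem hna hmem' hd
        have hrnb : rnk S m nb y' + 1 = rnk S m x y' := by
          unfold rnk
          rw [if_neg hnb, if_pos hmem']
        have hb1 : rnk S m nb y' ≤ n' := by omega
        have hb2 : rnk S m nb y' ≤ r' := by omega
        rw [ih n' (by omega) nb y' hb1, ih r' (by omega) nb y' hb2]
      congr 1
      · by_cases hg : memB (x + 1, y') S = false
        · rw [hg]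
          simp only [Bool.not_false, if_true]
          exact key (x + 1) (by omega) hg
        · rw [Bool.not_eq_false] at hg
          rw [hg]
          rfl
      · by_cases hg : memB (x - 1, y') S = false
        · rw [hg]
          simp only [Bool.not_false, if_true]
          exact key (x - 1) (by omega) hg
        · rw [Bool.not_eq_false] at hg
          rw [hg]
          rfl

-- the value of a timeline started at (x, y)
def FV (S : List (List Int)) (m x y : Int) : Int :=
  fB S m (rnk S m x y) x y

theorem FV_retire {S : List (List Int)} {m x y : Int} (h : m ≤ y) : FV S m x y = 1 := by
  unfold FV
  obtain ⟨r', hr⟩ : ∃ r', rnk S m x y = r' + 1 :=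
    ⟨rnk S m x y - 1, by have := rnk_pos S m x y; omega⟩
  rw [hr, fB_succ, skipDownB_eq_self (by omega), if_pos h]

theorem FV_split {S : List (List Int)} {m x y : Int} (hna : NoAdj S)
    (h1 : y < m) (h2 : [x, y + 1] ∈ S) :
    FV S m x y
      = (if [x + 1, y] ∈ S then 0 else FV S m (x + 1) y)
        + (if [x - 1, y] ∈ S then 0 else FV S m (x - 1) y) := by
  have hmem : memB (x, y + 1) S = true := by rw [memB_eq]; exact decide_eq_true h2
  have hr : rnk S m x y = (2 * (m - y).toNat + 1) + 1 := by
    unfold rnk; rw [if_pos h2]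
  have hself : skipDownB S m x y = y := skipDownB_eq_self (by simp [hmem])
  unfold FV
  rw [hr, fB_succ, hself, if_neg (by omega)]
  have key : ∀ nb : Int, (nb - x).natAbs = 1 →
      (if !memB (nb, y) S then fB S m (2 * (m - y).toNat + 1) nb y else 0)
        = (if [nb, y] ∈ S then 0 else FV S m nb y) := by
    intro nb hd
    have hnb : [nb, y + 1] ∉ S := noAdj_not_mem hna h2 hd
    have hrnb : rnk S m nb y = 2 * (m - y).toNat + 1 := by
      unfold rnk; rw [if_neg hnb]
    by_cases hg : [nb, y] ∈ S
    · have hb : memB (nb, y) S = true := by rw [memB_eq]; exact decide_eq_true hg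
      rw [hb, if_pos hg]
      rfl
    · have hb : memB (nb, y) S = false := by rw [memB_eq]; exact decide_eq_false hg
      rw [hb, if_neg hg]
      simp only [Bool.not_false, if_true]
      rw [FV, hrnb]
  rw [key (x + 1) (by omega), key (x - 1) (by omega)]
  rfl

theorem FV_down {S : List (List Int)} {m x y : Int} (hna : NoAdj S)
    (h1 : y < m) (h2 : [x, y + 1] ∉ S) : FV S m x y = FV S m x (y + 1) := by
  have hmem : memB (x, y + 1) S = false := by rw [memB_eq]; exact decide_eq_false h2
  have hr : rnk S m x y = 2 * (m - y).toNat + 1 := by unfold rnk; rw [if_neg h2]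
  have hr' : rnk S m x (y + 1) ≤ rnk S m x y := by
    rw [hr]; unfold rnk; split <;> omega
  unfold FV
  rw [fB_down _ h1 hmem, fB_rank hna _ x (y + 1) hr']

-- weighted sums over item lists
def wsum (w : Int × Int → Int) (l : List ((Int × Int) × Int)) : Int :=
  (l.map (fun p => p.2 * w p.1)).sum

theorem wsum_append (w : Int × Int → Int) (l1 l2 : List ((Int × Int) × Int)) :
    wsum w (l1 ++ l2) = wsum w l1 + wsum w l2 := by
  simp [wsum]

theorem wsum_replace (w : Int × Int → Int) (k : Int × Int) (v t : Int) :
    ∀ (l : List ((Int × Int) × Int)), (l.map (·.1)).Nodup → (k, v) ∈ l →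
      wsum w (l.map (fun p => if p.1 == k then (k, v + t) else p)) = wsum w l + t * w k := by
  intro l
  induction l with
  | nil => intro _ h; cases h
  | cons p rest ih =>
    intro hnd hm
    simp only [List.map_cons, List.nodup_cons] at hnd
    rcases List.mem_cons.mp hm with rfl | hm'
    · have hrest : rest.map (fun p => if p.1 == k then (k, v + t) else p) = rest := by
        calc rest.map (fun p => if p.1 == k then (k, v + t) else p)
            = rest.map id := by
              apply List.map_congr_left
              intro q hq
              have hq1 : q.1 ≠ k := by
                intro he; exact hnd.1 (he ▸ List.mem_map_of_mem (f := fun p => p.1) hq)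
              simp [hq1]
          _ = rest := List.map_id rest
      have hh : (((k, v).1 == k) : Bool) = true := by simp
      rw [List.map_cons, if_pos hh, hrest]
      simp only [wsum, List.map_cons, List.sum_cons]
      ring
    · have hp1 : p.1 ≠ k := by
        intro he
        exact hnd.1 (he ▸ List.mem_map_of_mem hm')
      rw [List.map_cons, if_neg (by simpa using hp1)]
      simp only [wsum, List.map_cons, List.sum_cons] at *
      rw [ih hnd.2 hm']
      ring

-- the `if n in row_blocks: row_blocks[n] += t else: row_blocks[n] = t` update
theorem addAt_wsum (w : Int × Int → Int) (d : PySem.Dict (Int × Int) Int)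
    (hnd : d.keys.Nodup) (k : Int × Int) (t : Int) :
    wsum w ((if (d.get? k).isSome then d.insert k (d.getD k 0 + t) else d.insert k t).items)
      = wsum w d.items + t * w k := by
  by_cases hs : (d.get? k).isSome
  · rw [if_pos hs]
    obtain ⟨v, hv⟩ := Option.isSome_iff_exists.mp hs
    have hgd : d.getD k 0 = v := PySem.Dict.getD_of_get?_eq_some _ _ hv
    have hct : d.contains k = true := by
      rw [PySem.Dict.contains_eq_isSome_get?, hv]; rfl
    rw [hgd, PySem.Dict.items_insert_of_contains _ _ hct]
    exact wsum_replace w k v t d.items hnd (PySem.Dict.mem_items_of_get?_eq_some _ hv)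
  · rw [if_neg hs]
    have hct : d.contains k = false := by
      rw [PySem.Dict.contains_eq_isSome_get?]
      simpa using hs
    rw [PySem.Dict.items_insert_of_not_contains _ _ hct, wsum_append]
    simp [wsum]

theorem addAt_nodup (d : PySem.Dict (Int × Int) Int) (hnd : d.keys.Nodup)
    (k : Int × Int) (t : Int) :
    ((if (d.get? k).isSome then d.insert k (d.getD k 0 + t) else d.insert k t).keys).Nodup := by
  by_cases hs : (d.get? k).isSome
  · rw [if_pos hs]; exact PySem.Dict.nodup_keys_insert _ _ _ hnd
  · rw [if_neg hs]; exact PySem.Dict.nodup_keys_insert _ _ _ hnd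

theorem addAt_items_sub (d : PySem.Dict (Int × Int) Int) (k : Int × Int) (t : Int) :
    ∀ p ∈ (if (d.get? k).isSome then d.insert k (d.getD k 0 + t) else d.insert k t).items,
      p ∈ d.items ∨ p.1 = k := by
  intro p hp
  by_cases hs : (d.get? k).isSome
  · rw [if_pos hs] at hp
    rcases (PySem.Dict.mem_items_insert _ _ _ _).mp hp with h | h
    · exact Or.inr (by rw [h])
    · exact Or.inl h.1
  · rw [if_neg hs] at hp
    rcases (PySem.Dict.mem_items_insert _ _ _ _).mp hp with h | h
    · exact Or.inr (by rw [h])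
    · exact Or.inl h.1

-- the guarded update `if n in splitters: continue` + counter insert, as one step
theorem guardAdd_wsum (w : Int × Int → Int) (d : PySem.Dict (Int × Int) Int)
    (hnd : d.keys.Nodup) (g : Bool) (k : Int × Int) (t : Int) :
    wsum w (if g then d
        else if (d.get? k).isSome then d.insert k (d.getD k 0 + t) else d.insert k t).items
      = wsum w d.items + (if g then 0 else t * w k) := by
  cases g
  · simpa using addAt_wsum w d hnd k t
  · simp

theorem guardAdd_nodup (d : PySem.Dict (Int × Int) Int) (hnd : d.keys.Nodup)
    (g : Bool) (k : Int × Int) (t : Int) :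
    ((if g then d
        else if (d.get? k).isSome then d.insert k (d.getD k 0 + t) else d.insert k t).keys).Nodup := by
  cases g
  · simpa using addAt_nodup d hnd k t
  · simpa using hnd

theorem guardAdd_items_sub (d : PySem.Dict (Int × Int) Int) (g : Bool) (k : Int × Int) (t : Int) :
    ∀ p ∈ (if g then d
        else if (d.get? k).isSome then d.insert k (d.getD k 0 + t) else d.insert k t).items,
      p ∈ d.items ∨ p.1 = k := by
  cases g
  · simpa using addAt_items_sub d k t
  · intro p hp
    exact Or.inl (by simpa using hp)

-- one stepA application: weighted-sum bookkeeping, nodup, and key provenance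
theorem stepA_wsum {S : List (List Int)} {m : Int} (hna : NoAdj S)
    (c : Int) (d : PySem.Dict (Int × Int) Int) (hnd : d.keys.Nodup) (e : Int × Int × Int) :
    (stepA S m (c, d) e).1 + wsum (fun p => FV S m p.1 p.2) (stepA S m (c, d) e).2.items
        = c + wsum (fun p => FV S m p.1 p.2) d.items + e.2.2 * FV S m e.1 e.2.1
      ∧ (stepA S m (c, d) e).2.keys.Nodup
      ∧ (∀ p ∈ (stepA S m (c, d) e).2.items,
          p ∈ d.items ∨ rnk S m p.1.1 p.1.2 < rnk S m e.1 e.2.1) := by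
  obtain ⟨x, y, t⟩ := e
  by_cases hy : m ≤ y
  · simp only [stepA, if_pos hy]
    refine ⟨?_, hnd, fun p hp => Or.inl hp⟩
    rw [FV_retire hy]; ring
  · rw [not_le] at hy
    by_cases hsp : [x, y + 1] ∈ S
    · have hmA : memA (x, y + 1) S = true := by rw [memA_eq]; exact decide_eq_true hsp
      simp only [stepA, if_neg (not_le.mpr hy), hmA, if_true, List.foldl_cons, List.foldl_nil]
      have hn1 := guardAdd_nodup d hnd (memA (x + 1, y) S) (x + 1, y) t
      set D1 := (if memA (x + 1, y) S then d
        else if (d.get? (x + 1, y)).isSome then d.insert (x + 1, y) (d.getD (x + 1, y) 0 + t)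
          else d.insert (x + 1, y) t) with hD1
      have hrnk : ∀ nb : Int, (nb - x).natAbs = 1 → rnk S m nb y < rnk S m x y := by
        intro nb hd'
        have hnm : [nb, y + 1] ∉ S := noAdj_not_mem hna hsp hd'
        unfold rnk
        rw [if_neg hnm, if_pos hsp]
        omega
      refine ⟨?_, guardAdd_nodup D1 hn1 (memA (x - 1, y) S) (x - 1, y) t, ?_⟩
      · rw [guardAdd_wsum _ D1 hn1 (memA (x - 1, y) S) (x - 1, y) t,
          guardAdd_wsum _ d hnd (memA (x + 1, y) S) (x + 1, y) t,
          FV_split hna hy hsp]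
        simp only [memA_eq, decide_eq_true_eq, mul_add, mul_ite, mul_zero]
        ring
      · intro p hp
        rcases guardAdd_items_sub D1 (memA (x - 1, y) S) (x - 1, y) t p hp with h | h
        · rcases guardAdd_items_sub d (memA (x + 1, y) S) (x + 1, y) t p h with h' | h'
          · exact Or.inl h'
          · exact Or.inr (by rw [h']; exact hrnk (x + 1) (by omega))
        · exact Or.inr (by rw [h]; exact hrnk (x - 1) (by omega))
    · have hmA : memA (x, y + 1) S = false := by rw [memA_eq]; exact decide_eq_false hsp
      simp only [stepA, if_neg (not_le.mpr hy), hmA, Bool.false_eq_true, if_false, if_pos hy]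
      refine ⟨?_, addAt_nodup d hnd (x, y + 1) t, ?_⟩
      · rw [addAt_wsum (fun p => FV S m p.1 p.2) d hnd (x, y + 1) t,
          FV_down hna hy hsp]
        ring
      · intro p hp
        rcases addAt_items_sub d (x, y + 1) t p hp with h | h
        · exact Or.inl h
        · refine Or.inr ?_
          rw [h]
          unfold rnk
          rw [if_neg hsp]
          split <;> omega

-- a whole pass over the queue
theorem passA_inv {S : List (List Int)} {m : Int} (hna : NoAdj S) :
    ∀ (q : List (Int × Int × Int)) (c : Int) (d : PySem.Dict (Int × Int) Int),
      d.keys.Nodup →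
      (q.foldl (stepA S m) (c, d)).1
          + wsum (fun p => FV S m p.1 p.2) (q.foldl (stepA S m) (c, d)).2.items
          = c + wsum (fun p => FV S m p.1 p.2) d.items
            + (q.map (fun e => e.2.2 * FV S m e.1 e.2.1)).sum
        ∧ (q.foldl (stepA S m) (c, d)).2.keys.Nodup
        ∧ (∀ p ∈ (q.foldl (stepA S m) (c, d)).2.items,
            p ∈ d.items ∨ ∃ e ∈ q, rnk S m p.1.1 p.1.2 < rnk S m e.1 e.2.1) := by
  intro q
  induction q with
  | nil =>
    intro c d hnd
    exact ⟨by simp, hnd, fun p hp => Or.inl hp⟩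
  | cons e q ih =>
    intro c d hnd
    obtain ⟨hw, hn, hs⟩ := stepA_wsum hna c d hnd e
    have hstep : stepA S m (c, d) e = ((stepA S m (c, d) e).1, (stepA S m (c, d) e).2) := rfl
    simp only [List.foldl_cons]
    rw [hstep]
    obtain ⟨ihw, ihn, ihs⟩ := ih (stepA S m (c, d) e).1 (stepA S m (c, d) e).2 hn
    refine ⟨?_, ihn, ?_⟩
    · rw [ihw, hw]
      simp only [List.map_cons, List.sum_cons]
      ring
    · intro p hp
      rcases ihs p hp with h | ⟨e', he', h⟩
      · rcases hs p h with h' | h'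
        · exact Or.inl h'
        · exact Or.inr ⟨e, List.mem_cons_self .., h'⟩
      · exact Or.inr ⟨e', List.mem_cons_of_mem _ he', h⟩

-- the loop computes the weighted total, provided the fuel exceeds every rank in the queue
theorem loopA_adequate {S : List (List Int)} {m : Int} (hna : NoAdj S) :
    ∀ (fuel : Nat) (q : List (Int × Int × Int)) (c : Int),
      (∀ e ∈ q, rnk S m e.1 e.2.1 < fuel) →
      loopA S m fuel q c = c + (q.map (fun e => e.2.2 * FV S m e.1 e.2.1)).sum := by
  intro fuel
  induction fuel with
  | zero =>
    intro q c hq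
    have : q = [] := by
      cases q with
      | nil => rfl
      | cons e q => exact absurd (hq e (List.mem_cons_self ..)) (by omega)
    subst this
    simp [loopA]
  | succ n ih =>
    intro q c hq
    by_cases hqn : q = []
    · subst hqn; simp [loopA]
    · simp only [loopA, if_neg hqn]
      obtain ⟨hw, -, hs⟩ := passA_inv (S := S) (m := m) hna q c PySem.Dict.empty (by
        simp [PySem.Dict.empty, PySem.Dict.keys])
      rw [ih _ _ ?_]
      · have hmap :
            (((passA S m q c).2.items.map (fun it => (it.1.1, it.1.2, it.2))).map
                (fun e => e.2.2 * FV S m e.1 e.2.1)).sum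
              = wsum (fun p => FV S m p.1 p.2) (passA S m q c).2.items := by
          rw [List.map_map]
          rfl
        rw [hmap]
        simp only [passA] at hw ⊢
        have hempty : wsum (fun p => FV S m p.1 p.2) (PySem.Dict.empty (κ := Int × Int) (ν := Int)).items = 0 := rfl
        rw [hempty, add_zero] at hw
        omega
      · intro e' he'
        rcases List.mem_map.mp he' with ⟨p, hp, rfl⟩
        rcases hs p hp with h | ⟨e, he, h⟩
        · have : (PySem.Dict.empty (κ := Int × Int) (ν := Int)).items = [] := rfl
          rw [this] at h
          cases h
        · have := hq e he
          simp only []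
          omega

-- fuel adequacy for B
theorem fB_top {S : List (List Int)} {m : Int} (hna : NoAdj S) (x y : Int) :
    fB S m (2 * (m - y).toNat + 2) x y = FV S m x y := by
  have h : rnk S m x y ≤ 2 * (m - y).toNat + 2 := by unfold rnk; split <;> omega
  exact fB_rank hna _ x y h

-- ===== VERDICT (by name: the statement is the Claim_ definition above) =====
theorem simulate_timelines_spec : Claim_equal_simulate_timelines := by
  intro start splitters _ hpre
  obtain ⟨hlen, -, -, hna⟩ := hpre
  match start, hlen with
  | [sx, sy], _ =>
    simp only [Spec_simulate_timelines, simulate_timelines, simulate_timelines_alt]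
    rw [if_pos (by simp)]
    have hA := loopA_adequate (S := splitters)
      (m := ((PySem.List.max? (splitters.map (fun s => s.getD 1 0)) (fun y => y)).getD 0) + 1)
      hna (2 * ((((PySem.List.max? (splitters.map (fun s => s.getD 1 0)) (fun y => y)).getD 0) + 1) - sy).toNat + 3)
      [(sx, sy, 1)] 0
      (by
        intro e he
        simp only [List.mem_singleton] at he
        subst he
        simp only []
        unfold rnk
        split <;> omega)
    rw [hA]
    have hgd0 : ([sx, sy] : List Int).getD 0 0 = sx := rfl
    have hgd1 : ([sx, sy] : List Int).getD 1 0 = sy := rfl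
    rw [hgd0, hgd1]
    rw [fB_top hna sx sy]
    simp
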